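-- pv_equiv track=rewrite | github.com/louisja1/RS-repair | src/matching.py | _find_fractional_loop
-- ===== SOURCE A (Python) =====
-- def _compute_adj(edges):
--     ltr = {}
--     rtl = {}
--     for id in range(len(edges)):
--         if edges[id][0] not in ltr:
--             ltr[edges[id][0]] = []
--         if edges[id][1] not in rtl:
--             rtl[edges[id][1]] = []
--         ltr[edges[id][0]].append(id)
--         rtl[edges[id][1]].append(id)
--     return ltr, rtl
--
-- def _find(edges, path, vis, adj):
--     if len(path) > 1 and edges[path[-1]][0] == edges[path[0]][0]:
--         return True
--     other_side = len(path) % 2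
--     for to in adj[other_side][edges[path[-1]][other_side]]:
--         if not vis[to]:
--             vis[to] = True
--             path.append(to)
--             flag = _find(edges, path, vis, adj)
--             if flag:
--                 return True
--             path.pop()
--             vis[to] = False
--     return False
--
-- def _find_fractional_loop(edges):
--     ltr, rtl = _compute_adj(edges)
--     path = []
--     vis = {id: False for id in range(len(edges))}
--     for id in range(len(edges)):
--         vis[id] = True
--         path.append(id)
--         # start from left side
--         if _find(edges=edges, path=path, vis=vis, adj=[ltr, rtl]):
--             return path
--         path.pop()
--         vis[id] = False
--     return path
-- ===== SOURCE B (Python) =====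
-- def _find_fractional_loop(edges):
--     # Iterative backtracking DFS with an explicit stack of neighbour cursors
--     # (no recursion); returns exactly the path A's recursive search finds.
--     n = len(edges)
--     ltr = {}
--     rtl = {}
--     for i in range(n):
--         u, v = edges[i]
--         ltr.setdefault(u, []).append(i)
--         rtl.setdefault(v, []).append(i)
--     adj = (ltr, rtl)
--     vis = [False] * n
--     path = []
--     for start in range(n):
--         vis[start] = True
--         path.append(start)
--         side = len(path) % 2
--         stack = [list(adj[side][edges[start][side]])]
--         while stack:
--             rem = stack[-1]
--             if not rem:
--                 stack.pop()
--                 vis[path[-1]] = False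
--                 path.pop()
--                 continue
--             to = rem.pop(0)
--             if vis[to]:
--                 continue
--             vis[to] = True
--             path.append(to)
--             if len(path) > 1 and edges[to][0] == edges[path[0]][0]:
--                 return path
--             side = len(path) % 2
--             stack.append(list(adj[side][edges[to][side]]))
--     return path
-- ===== Notes on version B (the rewrite author's own statement) =====
-- stated objective: alternative
-- what changed: The recursive backtracking helper _find is eliminated: B runs the same alternating-edge DFS iteratively with an explicit stack of neighbour-cursor frames, pushing/advancing/popping frames instead of recursing.
import Mathlib
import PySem

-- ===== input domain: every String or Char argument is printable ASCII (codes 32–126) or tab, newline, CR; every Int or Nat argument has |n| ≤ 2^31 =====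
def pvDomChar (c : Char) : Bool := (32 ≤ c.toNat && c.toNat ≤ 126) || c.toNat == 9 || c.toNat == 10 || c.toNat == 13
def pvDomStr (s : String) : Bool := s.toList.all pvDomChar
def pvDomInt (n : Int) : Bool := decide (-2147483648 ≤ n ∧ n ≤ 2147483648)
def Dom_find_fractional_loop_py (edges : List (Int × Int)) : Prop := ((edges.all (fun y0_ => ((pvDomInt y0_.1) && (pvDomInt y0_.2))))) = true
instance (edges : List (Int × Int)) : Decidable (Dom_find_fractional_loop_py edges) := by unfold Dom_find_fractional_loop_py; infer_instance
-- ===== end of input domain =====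

-- B replaces A's recursive backtracking helper `_find` by an iterative DFS over an explicit
-- stack of neighbour-cursor frames (same traversal order and same returned path); objective: alternative.

-- ===== PORT A =====
-- shared accessors (both Pythons contain these same expressions):
-- edges[i]; index always in range in every execution, so the default is never used
def pvEdge (edges : List (Int × Int)) (i : Int) : Int × Int := PySem.List.pyGetD edges i (0, 0)
-- dict-entry update vis[k] = b (vis is a dict with int keys, modelled as a total function)
def pvOv (k : Int) (b : Bool) (vis : Int → Bool) : Int → Bool := fun j => if j = k then b else vis j
-- adj[len(path)%2][edges[path[-1]][len(path)%2]]; the key is always present, so getD [] is exact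
def pvNbrs (edges : List (Int × Int)) (ltr rtl : PySem.Dict Int (List Int)) (path : List Int) : List Int :=
  let node := PySem.List.pyGetD path (-1) 0
  if path.length % 2 = 1 then rtl.getD (pvEdge edges node).2 []
  else ltr.getD (pvEdge edges node).1 []

-- one iteration of _compute_adj's loop ('if not in: d[k]=[]' then append)
def pvAdjStepA (edges : List (Int × Int))
    (ab : PySem.Dict Int (List Int) × PySem.Dict Int (List Int)) (id : Nat) :
    PySem.Dict Int (List Int) × PySem.Dict Int (List Int) :=
  let e := pvEdge edges (id : Int)
  let l1 := if ab.1.contains e.1 then ab.1 else ab.1.insert e.1 []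
  let r1 := if ab.2.contains e.2 then ab.2 else ab.2.insert e.2 []
  (l1.modify e.1 [] (· ++ [(id : Int)]), r1.modify e.2 [] (· ++ [(id : Int)]))

-- the 'for tt in adj[...]' loop of _find; `rec` is the recursive call (_find one level deeper)
def pvFindLoop (edges : List (Int × Int)) (ltr rtl : PySem.Dict Int (List Int))
    (rec : List Int → (Int → Bool) → Bool × List Int × (Int → Bool)) :
    List Int → List Int → (Int → Bool) → Bool × List Int × (Int → Bool)
  | [], path, vis => (false, path, vis)
  | tt :: rest, path, vis =>
    if vis tt then pvFindLoop edges ltr rtl rec rest path vis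
    else
      let r := rec (path ++ [tt]) (pvOv tt true vis)
      if r.1 then r
      else pvFindLoop edges ltr rtl rec rest r.2.1.dropLast (pvOv tt false r.2.2)

-- _find; fuel = remaining recursion depth (called with edges.length: each nested call visits a
-- fresh edge, so the fuel-0 branch is never reached in an actual run)
def pvFind (edges : List (Int × Int)) (ltr rtl : PySem.Dict Int (List Int)) :
    Nat → List Int → (Int → Bool) → Bool × List Int × (Int → Bool)
  | fuel, path, vis =>
    if 1 < path.length ∧
        (pvEdge edges (PySem.List.pyGetD path (-1) 0)).1 =
        (pvEdge edges (PySem.List.pyGetD path 0 0)).1 then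
      (true, path, vis)
    else
      match fuel with
      | 0 => (false, path, vis)
      | f + 1 =>
        pvFindLoop edges ltr rtl (fun p v => pvFind edges ltr rtl f p v)
          (pvNbrs edges ltr rtl path) path vis

-- the outer 'for id in range(len(edges))' loop of _find_fractional_loop
def pvOuterA (edges : List (Int × Int)) (ltr rtl : PySem.Dict Int (List Int)) :
    List Int → List Int → (Int → Bool) → List Int
  | [], path, _ => path
  | s :: rest, path, vis =>
    let r := pvFind edges ltr rtl edges.length (path ++ [s]) (pvOv s true vis)
    if r.1 then r.2.1
    else pvOuterA edges ltr rtl rest r.2.1.dropLast (pvOv s false r.2.2)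

def find_fractional_loop_py (edges : List (Int × Int)) : List Int :=
  let ab := (List.range edges.length).foldl (pvAdjStepA edges) (PySem.Dict.mk [], PySem.Dict.mk [])
  pvOuterA edges ab.1 ab.2 ((List.range edges.length).map (fun (i : Nat) => (i : Int))) [] (fun _ => false)

-- ===== PORT B =====
-- one iteration of B's adjacency loop: setdefault(k, []).append(i)  =  d[k] = d.get(k, []) + [i]
def pvAdjStepB (edges : List (Int × Int))
    (ab : PySem.Dict Int (List Int) × PySem.Dict Int (List Int)) (id : Nat) :
    PySem.Dict Int (List Int) × PySem.Dict Int (List Int) :=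
  let e := pvEdge edges (id : Int)
  (ab.1.modify e.1 [] (· ++ [(id : Int)]), ab.2.modify e.2 [] (· ++ [(id : Int)]))

-- B's 'while stack' loop: explicit stack of neighbour-cursor frames; fuel bounds the number of
-- iterations (chosen large enough below; the fuel-0 branch is never reached in an actual run)
def pvMachine (edges : List (Int × Int)) (ltr rtl : PySem.Dict Int (List Int)) :
    Nat → List (List Int) → List Int → (Int → Bool) →
    Option (List Int) × List Int × (Int → Bool)
  | 0, _, path, vis => (none, path, vis)
  | _ + 1, [], path, vis => (none, path, vis)
  | fuel + 1, [] :: stack, path, vis =>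
    -- cursor exhausted: backtrack (vis[path[-1]] = False; path.pop())
    pvMachine edges ltr rtl fuel stack path.dropLast
      (pvOv (PySem.List.pyGetD path (-1) 0) false vis)
  | fuel + 1, (tt :: rem) :: stack, path, vis =>
    if vis tt then pvMachine edges ltr rtl fuel (rem :: stack) path vis
    else
      let vis1 := pvOv tt true vis
      let path1 := path ++ [tt]
      if 1 < path1.length ∧
          (pvEdge edges tt).1 = (pvEdge edges (PySem.List.pyGetD path1 0 0)).1 then
        (some path1, path1, vis1)
      else
        pvMachine edges ltr rtl fuel (pvNbrs edges ltr rtl path1 :: rem :: stack) path1 vis1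

-- B's outer 'for start in range(n)' loop
def pvOuterB (edges : List (Int × Int)) (ltr rtl : PySem.Dict Int (List Int)) :
    List Int → List Int → (Int → Bool) → List Int
  | [], path, _ => path
  | s :: rest, path, vis =>
    let path1 := path ++ [s]
    let vis1 := pvOv s true vis
    let r := pvMachine edges ltr rtl ((edges.length + 3) ^ (edges.length + 2))
      [pvNbrs edges ltr rtl path1] path1 vis1
    match r.1 with
    | some p => p
    | none => pvOuterB edges ltr rtl rest r.2.1 r.2.2

def find_fractional_loop_py_alt (edges : List (Int × Int)) : List Int :=
  let ab := (List.range edges.length).foldl (pvAdjStepB edges) (PySem.Dict.mk [], PySem.Dict.mk [])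
  pvOuterB edges ab.1 ab.2 ((List.range edges.length).map (fun (i : Nat) => (i : Int))) [] (fun _ => false)

-- ===== PRECONDITION & SPEC =====
def Spec_find_fractional_loop_py (edges : List (Int × Int)) (out : List Int) : Prop := out = find_fractional_loop_py_alt edges
instance (edges : List (Int × Int)) (out : List Int) : Decidable (Spec_find_fractional_loop_py edges out) := by unfold Spec_find_fractional_loop_py; infer_instance

-- ===== CLAIM (what is proved, stated in full; the proofs are below) =====
def Claim_equal_find_fractional_loop_py : Prop := ∀ (edges : List (Int × Int)), Dom_find_fractional_loop_py edges → Spec_find_fractional_loop_py edges (find_fractional_loop_py edges)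

-- ===== LEMMAS AND PROOFS =====

-- the candidate edge ids 0 .. n-1
def pvGoodIds (edges : List (Int × Int)) : List Int :=
  (List.range edges.length).map (fun (i : Nat) => (i : Int))

-- number of unvisited edge ids
def pvUnvis (edges : List (Int × Int)) (vis : Int → Bool) : Nat :=
  (pvGoodIds edges).countP (fun i => !vis i)

lemma pvOv_ov (k : Int) (b b' : Bool) (v : Int → Bool) : pvOv k b (pvOv k b' v) = pvOv k b v := by
  funext j; simp only [pvOv]; split_ifs <;> rfl

lemma pvOv_self (k : Int) (b : Bool) (v : Int → Bool) (h : v k = b) : pvOv k b v = v := by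
  funext j; simp only [pvOv]; split_ifs with hj
  · subst hj; exact h.symm
  · rfl

lemma pvGoodIds_nodup (edges : List (Int × Int)) : (pvGoodIds edges).Nodup := by
  unfold pvGoodIds
  exact List.Nodup.map (fun a b h => by exact_mod_cast h) List.nodup_range

lemma mem_pvGoodIds {edges : List (Int × Int)} {x : Int} :
    x ∈ pvGoodIds edges ↔ 0 ≤ x ∧ x < (edges.length : Int) := by
  simp only [pvGoodIds, List.mem_map, List.mem_range]
  constructor
  · rintro ⟨i, hi, rfl⟩; exact ⟨by positivity, by exact_mod_cast hi⟩
  · rintro ⟨h0, hl⟩; exact ⟨x.toNat, by omega, by omega⟩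

lemma pvCountFlip : ∀ (l : List Int) (v : Int → Bool) (t : Int), l.Nodup → t ∈ l → v t = false →
    l.countP (fun i => !(pvOv t true v) i) + 1 = l.countP (fun i => !v i) := by
  intro l v t hnd hm hv
  induction l with
  | nil => cases hm
  | cons a l ih =>
    rcases List.nodup_cons.mp hnd with ⟨ha, hl⟩
    simp only [List.countP_cons]
    by_cases hat : a = t
    · subst hat
      have h3 : l.countP (fun i => !(pvOv a true v) i) = l.countP (fun i => !v i) := by
        apply List.countP_congr
        intro x hx
        have hxa : x ≠ a := fun h => ha (h ▸ hx)
        simp [pvOv, hxa]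
      rw [h3]
      simp [pvOv, hv]
    · have hm' : t ∈ l := by
        rcases List.mem_cons.mp hm with h | h
        exacts [(hat h.symm).elim, h]
      have hih := ih hl hm'
      have hpa : pvOv t true v a = v a := by
        by_cases h : a = t
        · exact (hat h).elim
        · simp [pvOv, h]
      rw [hpa]
      omega

lemma pvUnvis_pos {edges : List (Int × Int)} {v : Int → Bool} {tt : Int}
    (hm : tt ∈ pvGoodIds edges) (hv : v tt = false) : 0 < pvUnvis edges v := by
  exact List.countP_pos_iff.mpr ⟨tt, hm, by simp [hv]⟩

lemma pvUnvis_flip {edges : List (Int × Int)} {v : Int → Bool} {tt : Int}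
    (hm : tt ∈ pvGoodIds edges) (hv : v tt = false) :
    pvUnvis edges (pvOv tt true v) + 1 = pvUnvis edges v :=
  pvCountFlip _ v tt (pvGoodIds_nodup edges) hm hv

-- restoration: a failed loop returns the state it was entered with
lemma pvLoopFail (edges : List (Int × Int)) (ltr rtl : PySem.Dict Int (List Int))
    (rec : List Int → (Int → Bool) → Bool × List Int × (Int → Bool))
    (hrec : ∀ p v, (rec p v).1 = false → rec p v = (false, p, v)) :
    ∀ (nbrs path : List Int) (vis : Int → Bool),
      (pvFindLoop edges ltr rtl rec nbrs path vis).1 = false →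
      pvFindLoop edges ltr rtl rec nbrs path vis = (false, path, vis) := by
  intro nbrs
  induction nbrs with
  | nil => intro path vis _; simp [pvFindLoop]
  | cons t rest ih =>
    intro path vis h
    cases hvt : vis t with
    | true =>
      have he : pvFindLoop edges ltr rtl rec (t :: rest) path vis =
          pvFindLoop edges ltr rtl rec rest path vis := by
        simp [pvFindLoop, hvt]
      rw [he] at h ⊢
      exact ih path vis h
    | false =>
      have hr : (rec (path ++ [t]) (pvOv t true vis)).1 = false := by
        cases hrb : (rec (path ++ [t]) (pvOv t true vis)).1
        · rfl
        · simp [pvFindLoop, hvt, hrb] at h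
      have hrec' := hrec _ _ hr
      have he : pvFindLoop edges ltr rtl rec (t :: rest) path vis =
          pvFindLoop edges ltr rtl rec rest path vis := by
        simp only [pvFindLoop, hvt]
        rw [hrec']
        simp only [Bool.false_eq_true, if_false]
        rw [List.dropLast_concat, pvOv_ov, pvOv_self t false vis hvt]
      rw [he] at h ⊢
      exact ih path vis h

lemma pvFindFail (edges : List (Int × Int)) (ltr rtl : PySem.Dict Int (List Int)) :
    ∀ (f : Nat) (path : List Int) (vis : Int → Bool),
      (pvFind edges ltr rtl f path vis).1 = false →
      pvFind edges ltr rtl f path vis = (false, path, vis) := by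
  intro f
  induction f with
  | zero =>
    intro path vis h
    by_cases hc : 1 < path.length ∧
        (pvEdge edges (PySem.List.pyGetD path (-1) 0)).1 =
        (pvEdge edges (PySem.List.pyGetD path 0 0)).1
    · rw [pvFind, if_pos hc] at h; simp at h
    · rw [pvFind, if_neg hc]
  | succ g ih =>
    intro path vis h
    by_cases hc : 1 < path.length ∧
        (pvEdge edges (PySem.List.pyGetD path (-1) 0)).1 =
        (pvEdge edges (PySem.List.pyGetD path 0 0)).1
    · rw [pvFind, if_pos hc] at h; simp at h
    · rw [pvFind, if_neg hc] at h ⊢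
      exact pvLoopFail edges ltr rtl _ (fun p v => ih p v) _ _ _ h

-- the machine ignores fuel on an empty stack
lemma pvMachine_nil (edges : List (Int × Int)) (ltr rtl : PySem.Dict Int (List Int)) :
    ∀ (m : Nat) (p : List Int) (v : Int → Bool),
      pvMachine edges ltr rtl m [] p v = (none, p, v) := by
  intro m p v; cases m <;> rfl

-- the simulation: the stack machine processing one frame behaves like one run of _find's loop
lemma pvSim (edges : List (Int × Int)) (ltr rtl : PySem.Dict Int (List Int))
    (Hmem : ∀ p x, x ∈ pvNbrs edges ltr rtl p → x ∈ pvGoodIds edges)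
    (Hlen : ∀ p, (pvNbrs edges ltr rtl p).length ≤ edges.length) :
    ∀ (f : Nat) (nbrs path : List Int) (vis : Int → Bool),
      (∀ x ∈ nbrs, x ∈ pvGoodIds edges) →
      pvUnvis edges vis ≤ f →
      ∃ c, c ≤ (nbrs.length + 1) * (edges.length + 3) ^ (f + 1) ∧
        ∀ (m : Nat) (stack : List (List Int)),
          pvMachine edges ltr rtl (m + c) (nbrs :: stack) path vis =
            (if (pvFindLoop edges ltr rtl (fun p v => pvFind edges ltr rtl f p v) nbrs path vis).1 then
               (some (pvFindLoop edges ltr rtl (fun p v => pvFind edges ltr rtl f p v) nbrs path vis).2.1,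
                (pvFindLoop edges ltr rtl (fun p v => pvFind edges ltr rtl f p v) nbrs path vis).2)
             else pvMachine edges ltr rtl m stack path.dropLast
                    (pvOv (PySem.List.pyGetD path (-1) 0) false vis)) := by
  intro f
  induction f with
  | zero =>
    intro nbrs
    induction nbrs with
    | nil =>
      intro path vis _ _
      refine ⟨1, ?_, ?_⟩
      · simp
      · intro m stack
        simp [pvMachine, pvFindLoop]
    | cons t rest ih =>
      intro path vis hmem hun
      cases hvt : vis t with
      | false =>
        exact absurd (pvUnvis_pos (hmem t List.mem_cons_self) hvt) (by omega)
      | true =>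
        obtain ⟨c, hc, H⟩ := ih path vis (fun x hx => hmem x (List.mem_cons_of_mem _ hx)) hun
        refine ⟨c + 1, ?_, ?_⟩
        · have hE : 1 ≤ (edges.length + 3) ^ (0 + 1) := Nat.one_le_pow _ _ (by omega)
          have hmul : (rest.length + 1 + 1) * (edges.length + 3) ^ (0 + 1) =
              (rest.length + 1) * (edges.length + 3) ^ (0 + 1) + (edges.length + 3) ^ (0 + 1) := by
            ring
          simp only [List.length_cons]
          rw [hmul]
          exact Nat.add_le_add hc hE
        · intro m stack
          have hrw : m + (c + 1) = (m + c) + 1 := by omega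
          rw [hrw]
          simp only [pvMachine, hvt, if_true]
          rw [H m stack]
          simp [pvFindLoop, hvt]
  | succ g ihf =>
    intro nbrs
    induction nbrs with
    | nil =>
      intro path vis _ _
      refine ⟨1, ?_, ?_⟩
      · simpa using Nat.one_le_pow (g + 1 + 1) (edges.length + 3) (by omega)
      · intro m stack
        simp [pvMachine, pvFindLoop]
    | cons t rest ih =>
      intro path vis hmem hun
      cases hvt : vis t with
      | true =>
        obtain ⟨c, hc, H⟩ := ih path vis (fun x hx => hmem x (List.mem_cons_of_mem _ hx)) hun
        refine ⟨c + 1, ?_, ?_⟩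
        · have hE : 1 ≤ (edges.length + 3) ^ (g + 1 + 1) := Nat.one_le_pow _ _ (by omega)
          have hmul : (rest.length + 1 + 1) * (edges.length + 3) ^ (g + 1 + 1) =
              (rest.length + 1) * (edges.length + 3) ^ (g + 1 + 1) + (edges.length + 3) ^ (g + 1 + 1) := by
            ring
          simp only [List.length_cons]
          rw [hmul]
          exact Nat.add_le_add hc hE
        · intro m stack
          have hrw : m + (c + 1) = (m + c) + 1 := by omega
          rw [hrw]
          simp only [pvMachine, hvt, if_true]
          rw [H m stack]
          simp [pvFindLoop, hvt]
      | false =>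
        have htm : t ∈ pvGoodIds edges := hmem t List.mem_cons_self
        have hflip := pvUnvis_flip htm hvt
        have hun1 : pvUnvis edges (pvOv t true vis) ≤ g := by omega
        obtain ⟨c1, hc1, H1⟩ := ihf (pvNbrs edges ltr rtl (path ++ [t])) (path ++ [t])
          (pvOv t true vis) (fun x hx => Hmem _ x hx) hun1
        obtain ⟨c2, hc2, H2⟩ := ih path vis (fun x hx => hmem x (List.mem_cons_of_mem _ hx)) hun
        have hlast : PySem.List.pyGetD (path ++ [t]) (-1) 0 = t :=
          PySem.List.pyGetD_neg_one_append_singleton path t 0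
        refine ⟨1 + c1 + c2, ?_, ?_⟩
        · -- cost bound
          have hlen1 := Hlen (path ++ [t])
          set n := edges.length with hn
          set a := (n + 3) ^ (g + 1) with ha'
          have ha : 1 ≤ a := Nat.one_le_pow _ _ (by omega)
          have hd : (n + 3) ^ (g + 1 + 1) = a * (n + 3) := by rw [ha']; ring
          have hb : c1 ≤ (n + 1) * a :=
            le_trans hc1 (Nat.mul_le_mul_right a (by omega))
          have hc2' : c2 ≤ (rest.length + 1) * (a * (n + 3)) := by rw [← hd]; exact hc2
          have hsplit : a * (n + 3) = (n + 1) * a + 2 * a := by ring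
          have step1 : 1 + (n + 1) * a ≤ a * (n + 3) := by rw [hsplit]; linarith
          simp only [List.length_cons]
          rw [hd]
          calc 1 + c1 + c2 ≤ (1 + (n + 1) * a) + (rest.length + 1) * (a * (n + 3)) :=
                Nat.add_le_add (Nat.add_le_add_left hb 1) hc2'
            _ ≤ a * (n + 3) + (rest.length + 1) * (a * (n + 3)) :=
                Nat.add_le_add_right step1 _
            _ = (rest.length + 1 + 1) * (a * (n + 3)) := by ring
        · intro m stack
          have hrw : m + (1 + c1 + c2) = ((m + c2) + c1) + 1 := by omega
          rw [hrw]
          by_cases hcond : 1 < (path ++ [t]).length ∧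
              (pvEdge edges t).1 = (pvEdge edges (PySem.List.pyGetD (path ++ [t]) 0 0)).1
          · -- the cycle test fires on entering t: both sides stop with the extended path
            have hfind : pvFind edges ltr rtl (g + 1) (path ++ [t]) (pvOv t true vis) =
                (true, path ++ [t], pvOv t true vis) := by
              rw [pvFind, if_pos (by rw [hlast]; exact hcond)]
            have hloop : pvFindLoop edges ltr rtl (fun p v => pvFind edges ltr rtl (g + 1) p v)
                (t :: rest) path vis = (true, path ++ [t], pvOv t true vis) := by
              simp only [pvFindLoop, hvt, Bool.false_eq_true, if_false]
              rw [hfind]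
              simp
            rw [hloop]
            simp only [pvMachine, hvt, Bool.false_eq_true, if_false]
            rw [if_pos hcond]
            simp
          · -- no cycle yet: the machine pushes the frame of t; _find recurses into t
            have hfind : pvFind edges ltr rtl (g + 1) (path ++ [t]) (pvOv t true vis) =
                pvFindLoop edges ltr rtl (fun p v => pvFind edges ltr rtl g p v)
                  (pvNbrs edges ltr rtl (path ++ [t])) (path ++ [t]) (pvOv t true vis) := by
              rw [pvFind, if_neg (by rw [hlast]; exact hcond)]
            simp only [pvMachine, hvt, Bool.false_eq_true, if_false]
            rw [if_neg hcond]
            rw [H1 (m + c2) (rest :: stack)]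
            cases hr1 : (pvFindLoop edges ltr rtl (fun p v => pvFind edges ltr rtl g p v)
                (pvNbrs edges ltr rtl (path ++ [t])) (path ++ [t]) (pvOv t true vis)).1 with
            | true =>
              have hloop : pvFindLoop edges ltr rtl (fun p v => pvFind edges ltr rtl (g + 1) p v)
                  (t :: rest) path vis =
                  pvFindLoop edges ltr rtl (fun p v => pvFind edges ltr rtl g p v)
                    (pvNbrs edges ltr rtl (path ++ [t])) (path ++ [t]) (pvOv t true vis) := by
                simp only [pvFindLoop, hvt, Bool.false_eq_true, if_false]
                rw [hfind, if_pos hr1]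
              rw [hloop]
              simp [hr1]
            | false =>
              have hres := pvLoopFail edges ltr rtl (fun p v => pvFind edges ltr rtl g p v)
                (fun p v hfail => pvFindFail edges ltr rtl g p v hfail)
                (pvNbrs edges ltr rtl (path ++ [t])) (path ++ [t]) (pvOv t true vis) hr1
              have hloop : pvFindLoop edges ltr rtl (fun p v => pvFind edges ltr rtl (g + 1) p v)
                  (t :: rest) path vis =
                  pvFindLoop edges ltr rtl (fun p v => pvFind edges ltr rtl (g + 1) p v)
                    rest path vis := by
                simp only [pvFindLoop, hvt, Bool.false_eq_true, if_false]
                rw [hfind, hres]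
                simp [pvOv_ov, pvOv_self t false vis hvt]
              rw [hloop]
              rw [hlast, List.dropLast_concat, pvOv_ov, pvOv_self t false vis hvt]
              exact H2 m stack
-- a Dict whose key is first ensured present with [] then appended to equals a single modify
lemma pvDictInsIns (d : PySem.Dict Int (List Int)) (k : Int) (w : List Int)
    (h : d.contains k = false) : (d.insert k []).insert k w = d.insert k w := by
  apply PySem.Dict.ext
  have hmem : ∀ p ∈ d.items, (p.1 == k) = false := by
    intro p hp
    simpa using List.any_eq_false.mp h p hp
  rw [PySem.Dict.items_insert_of_contains _ _ (PySem.Dict.contains_insert_self d k []),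
      PySem.Dict.items_insert_of_not_contains _ _ h,
      PySem.Dict.items_insert_of_not_contains _ _ h]
  rw [List.map_append]
  congr 1
  · rw [List.map_congr_left (g := id) (fun p hp => by simp [hmem p hp]), List.map_id]
  · simp

lemma pvDictSetdefaultModify (d : PySem.Dict Int (List Int)) (k : Int) (f : List Int → List Int)
    (h : d.contains k = false) : (d.insert k []).modify k [] f = d.modify k [] f := by
  unfold PySem.Dict.modify
  rw [PySem.Dict.getD_insert_self, PySem.Dict.getD_of_not_contains _ _ h, pvDictInsIns _ _ _ h]

-- adjacency dicts: both ports build the same one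
lemma pvAdjStep_eq (edges : List (Int × Int)) :
    pvAdjStepA edges = pvAdjStepB edges := by
  funext ab id
  unfold pvAdjStepA pvAdjStepB
  cases h1 : ab.1.contains (pvEdge edges (id : Int)).1 <;>
    cases h2 : ab.2.contains (pvEdge edges (id : Int)).2
  · simp [h1, h2, pvDictSetdefaultModify _ _ _ h1, pvDictSetdefaultModify _ _ _ h2]
  · simp [h1, h2, pvDictSetdefaultModify _ _ _ h1]
  · simp [h1, h2, pvDictSetdefaultModify _ _ _ h2]
  · simp [h1, h2]

-- adjacency lists contain only edge ids
lemma pvAdjB_mem (edges : List (Int × Int)) :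
    ∀ (ids : List Nat) (ab : PySem.Dict Int (List Int) × PySem.Dict Int (List Int)),
      (∀ i ∈ ids, i < edges.length) →
      (∀ k : Int, (∀ x ∈ ab.1.getD k [], x ∈ pvGoodIds edges) ∧
        (∀ x ∈ ab.2.getD k [], x ∈ pvGoodIds edges)) →
      ∀ k : Int,
        (∀ x ∈ (ids.foldl (pvAdjStepB edges) ab).1.getD k [], x ∈ pvGoodIds edges) ∧
        (∀ x ∈ (ids.foldl (pvAdjStepB edges) ab).2.getD k [], x ∈ pvGoodIds edges) := by
  intro ids
  induction ids with
  | nil => intro ab _ hinv k; exact hinv k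
  | cons i ids ih =>
    intro ab hids hinv k
    rw [List.foldl_cons]
    refine ih _ (fun j hj => hids j (List.mem_cons_of_mem _ hj)) ?_ k
    intro k'
    have hi : ((i : Nat) : Int) ∈ pvGoodIds edges := by
      rw [mem_pvGoodIds]
      have := hids i (List.mem_cons_self)
      constructor
      · positivity
      · exact_mod_cast this
    constructor
    · intro x hx
      rw [pvAdjStepB] at hx
      simp only at hx
      rw [PySem.Dict.getD_modify] at hx
      by_cases hk : k' = (pvEdge edges (i : Int)).1
      · rw [if_pos hk] at hx
        rcases List.mem_append.mp hx with h | h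
        · exact (hinv _).1 x h
        · simpa using List.mem_singleton.mp h ▸ hi
      · rw [if_neg hk] at hx
        exact (hinv _).1 x hx
    · intro x hx
      rw [pvAdjStepB] at hx
      simp only at hx
      rw [PySem.Dict.getD_modify] at hx
      by_cases hk : k' = (pvEdge edges (i : Int)).2
      · rw [if_pos hk] at hx
        rcases List.mem_append.mp hx with h | h
        · exact (hinv _).2 x h
        · simpa using List.mem_singleton.mp h ▸ hi
      · rw [if_neg hk] at hx
        exact (hinv _).2 x hx

-- adjacency lists are no longer than the number of edges processed
lemma pvAdjB_len (edges : List (Int × Int)) :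
    ∀ (ids : List Nat) (ab : PySem.Dict Int (List Int) × PySem.Dict Int (List Int)) (k : Int),
      ((ids.foldl (pvAdjStepB edges) ab).1.getD k []).length ≤ (ab.1.getD k []).length + ids.length ∧
      ((ids.foldl (pvAdjStepB edges) ab).2.getD k []).length ≤ (ab.2.getD k []).length + ids.length := by
  intro ids
  induction ids with
  | nil => intro ab k; simp
  | cons i ids ih =>
    intro ab k
    rw [List.foldl_cons]
    have h1 := (ih (pvAdjStepB edges ab i) k).1
    have h2 := (ih (pvAdjStepB edges ab i) k).2
    have e1 : ((pvAdjStepB edges ab i).1.getD k []).length ≤ (ab.1.getD k []).length + 1 := by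
      rw [pvAdjStepB]
      simp only
      rw [PySem.Dict.getD_modify]
      split_ifs with hk
      · subst hk; simp
      · omega
    have e2 : ((pvAdjStepB edges ab i).2.getD k []).length ≤ (ab.2.getD k []).length + 1 := by
      rw [pvAdjStepB]
      simp only
      rw [PySem.Dict.getD_modify]
      split_ifs with hk
      · subst hk; simp
      · omega
    constructor
    · calc _ ≤ ((pvAdjStepB edges ab i).1.getD k []).length + ids.length := h1
        _ ≤ _ := by simp only [List.length_cons]; omega
    · calc _ ≤ ((pvAdjStepB edges ab i).2.getD k []).length + ids.length := h2
        _ ≤ _ := by simp only [List.length_cons]; omega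

-- the outer loops agree
lemma pvOuter_eq (edges : List (Int × Int)) (ltr rtl : PySem.Dict Int (List Int))
    (Hmem : ∀ p x, x ∈ pvNbrs edges ltr rtl p → x ∈ pvGoodIds edges)
    (Hlen : ∀ p, (pvNbrs edges ltr rtl p).length ≤ edges.length) :
    ∀ (starts : List Int), (∀ s ∈ starts, s ∈ pvGoodIds edges) →
      pvOuterA edges ltr rtl starts [] (fun _ => false) =
      pvOuterB edges ltr rtl starts [] (fun _ => false) := by
  intro starts
  induction starts with
  | nil => intro _; rfl
  | cons s rest ih =>
    intro hs
    have hsg : s ∈ pvGoodIds edges := hs s List.mem_cons_self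
    have hn : 0 < edges.length := by
      rcases mem_pvGoodIds.mp hsg with ⟨h0, hl⟩
      omega
    obtain ⟨k, hk⟩ : ∃ k, edges.length = k + 1 := ⟨edges.length - 1, by omega⟩
    have hlast : PySem.List.pyGetD (([] : List Int) ++ [s]) (-1) 0 = s :=
      PySem.List.pyGetD_neg_one_append_singleton [] s 0
    have hcond : ¬(1 < (([] : List Int) ++ [s]).length ∧
        (pvEdge edges (PySem.List.pyGetD (([] : List Int) ++ [s]) (-1) 0)).1 =
        (pvEdge edges (PySem.List.pyGetD (([] : List Int) ++ [s]) 0 0)).1) := by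
      simp
    have hfind : pvFind edges ltr rtl edges.length (([] : List Int) ++ [s])
        (pvOv s true (fun _ => false)) =
        pvFindLoop edges ltr rtl (fun p v => pvFind edges ltr rtl k p v)
          (pvNbrs edges ltr rtl ([] ++ [s])) ([] ++ [s]) (pvOv s true (fun _ => false)) := by
      rw [hk, pvFind, if_neg hcond]
    have hu0 : pvUnvis edges (fun _ => false) = edges.length := by
      unfold pvUnvis
      rw [List.countP_eq_length.mpr (by intro a _; rfl)]
      simp [pvGoodIds]
    have hvs : (fun _ : Int => false) s = false := rfl
    have hu1 : pvUnvis edges (pvOv s true (fun _ => false)) ≤ k := by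
      have := pvUnvis_flip (v := fun _ : Int => false) hsg hvs
      omega
    obtain ⟨c, hc, H⟩ := pvSim edges ltr rtl Hmem Hlen k
      (pvNbrs edges ltr rtl ([] ++ [s])) ([] ++ [s]) (pvOv s true (fun _ => false))
      (fun x hx => Hmem _ x hx) hu1
    have hcB : c ≤ (edges.length + 3) ^ (edges.length + 2) := by
      have h1 : (pvNbrs edges ltr rtl ([] ++ [s])).length + 1 ≤ edges.length + 1 := by
        have := Hlen (([] : List Int) ++ [s])
        omega
      have h2 : c ≤ (edges.length + 1) * (edges.length + 3) ^ (k + 1) :=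
        le_trans hc (Nat.mul_le_mul_right _ h1)
      have h3 : edges.length + 1 ≤ (edges.length + 3) * (edges.length + 3) := by nlinarith
      calc c ≤ (edges.length + 1) * (edges.length + 3) ^ (k + 1) := h2
        _ ≤ ((edges.length + 3) * (edges.length + 3)) * (edges.length + 3) ^ (k + 1) :=
            Nat.mul_le_mul_right _ h3
        _ = (edges.length + 3) ^ (edges.length + 2) := by rw [hk]; ring
    have hBig : (edges.length + 3) ^ (edges.length + 2) =
        ((edges.length + 3) ^ (edges.length + 2) - c) + c := (Nat.sub_add_cancel hcB).symm
    simp only [pvOuterA, pvOuterB]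
    rw [hfind, hBig, H ((edges.length + 3) ^ (edges.length + 2) - c) []]
    cases hr : (pvFindLoop edges ltr rtl (fun p v => pvFind edges ltr rtl k p v)
        (pvNbrs edges ltr rtl ([] ++ [s])) ([] ++ [s]) (pvOv s true (fun _ => false))).1 with
    | true => simp
    | false =>
      have hres := pvLoopFail edges ltr rtl (fun p v => pvFind edges ltr rtl k p v)
        (fun p v hfail => pvFindFail edges ltr rtl k p v hfail)
        (pvNbrs edges ltr rtl ([] ++ [s])) ([] ++ [s]) (pvOv s true (fun _ => false)) hr
    
      rw [hres]
      simp only [Bool.false_eq_true, if_false]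
      rw [hlast, List.dropLast_concat, pvOv_ov, pvOv_self s false _ hvs]
      rw [pvMachine_nil]
      simp only []
      exact ih (fun x hx => hs x (List.mem_cons_of_mem _ hx))

-- ===== VERDICT (by name: the statement is the Claim_ definition above) =====
theorem find_fractional_loop_py_spec : Claim_equal_find_fractional_loop_py := by
  intro edges _
  unfold Spec_find_fractional_loop_py
  simp only [find_fractional_loop_py, find_fractional_loop_py_alt]
  rw [pvAdjStep_eq]
  have hbase : ∀ k : Int,
      (∀ x ∈ (PySem.Dict.mk ([] : List (Int × List Int))).getD k [], x ∈ pvGoodIds edges) ∧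
      (∀ x ∈ (PySem.Dict.mk ([] : List (Int × List Int))).getD k [], x ∈ pvGoodIds edges) := by
    intro k
    constructor <;> intro x hx <;> simp [PySem.Dict.getD, PySem.Dict.get?] at hx
  have hmemd := pvAdjB_mem edges (List.range edges.length)
    (PySem.Dict.mk [], PySem.Dict.mk []) (fun i hi => List.mem_range.mp hi) hbase
  have hlend := pvAdjB_len edges (List.range edges.length) (PySem.Dict.mk [], PySem.Dict.mk [])
  set ab := (List.range edges.length).foldl (pvAdjStepB edges)
    (PySem.Dict.mk [], PySem.Dict.mk []) with hab
  have Hmem : ∀ p x, x ∈ pvNbrs edges ab.1 ab.2 p → x ∈ pvGoodIds edges := by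
    intro p x hx
    simp only [pvNbrs] at hx
    split_ifs at hx
    · exact (hmemd _).2 x hx
    · exact (hmemd _).1 x hx
  have Hlen : ∀ p, (pvNbrs edges ab.1 ab.2 p).length ≤ edges.length := by
    intro p
    simp only [pvNbrs]
    split_ifs
    · have h := (hlend ((pvEdge edges (PySem.List.pyGetD p (-1) 0)).2)).2
      simp [PySem.Dict.getD, PySem.Dict.get?] at h
      simpa using h
    · have h := (hlend ((pvEdge edges (PySem.List.pyGetD p (-1) 0)).1)).1
      simp [PySem.Dict.getD, PySem.Dict.get?] at h
      simpa using h
  have hstarts : ∀ s ∈ (List.range edges.length).map (fun (i : Nat) => (i : Int)),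
      s ∈ pvGoodIds edges := by
    intro s hsx
    exact hsx
  exact pvOuter_eq edges ab.1 ab.2 Hmem Hlen _ hstarts
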